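-- pv_equiv track=rewrite | github.com/YongjoonSeo/What_I_Studied | python/algostudy/boj2303.py | MaxUnits
-- ===== SOURCE A (Python) =====
-- def MaxUnits(lst):
--     result = 0
--     for i in range(len(lst)-2):
--         for j in range(i+1, len(lst)-1):
--             for k in range(j+1, len(lst)):
--                 temp = lst[i] + lst[j] + lst[k]
--                 temp %= 10
--                 if temp > result:
--                     result = temp
--     return result
-- ===== SOURCE B (Python) =====
-- def MaxUnits(lst):
--     # One pass: track last digits reachable by sums of 1, 2 and 3 distinct-position elements.
--     s1, s2, s3 = set(), set(), set()
--     for x in lst: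
--         r = x % 10
--         s3 |= {(p + r) % 10 for p in s2}
--         s2 |= {(q + r) % 10 for q in s1}
--         s1.add(r)
--     return max(s3, default=0)
-- ===== Notes on version B (the rewrite author's own statement) =====
-- stated objective: faster
-- what changed: Replaced the cubic triple-index loop with a single left-to-right pass that maintains the sets of last digits reachable by sums of 1, 2 and 3 elements seen so far (each set has at most 10 members), then takes the max.
import Mathlib
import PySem

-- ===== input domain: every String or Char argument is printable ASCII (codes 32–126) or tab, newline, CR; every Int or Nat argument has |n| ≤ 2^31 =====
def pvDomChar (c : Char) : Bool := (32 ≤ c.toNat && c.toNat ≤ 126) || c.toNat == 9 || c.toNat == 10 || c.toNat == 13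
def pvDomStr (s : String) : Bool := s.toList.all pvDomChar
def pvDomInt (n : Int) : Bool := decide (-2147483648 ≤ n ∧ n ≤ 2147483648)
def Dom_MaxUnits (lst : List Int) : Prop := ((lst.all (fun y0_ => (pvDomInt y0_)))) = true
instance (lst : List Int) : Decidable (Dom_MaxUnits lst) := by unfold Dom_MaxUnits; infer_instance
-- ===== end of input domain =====

-- B replaces A's cubic triple-index scan by one linear pass maintaining the sets of
-- last digits reachable as sums of 1, 2 and 3 already-seen elements (each set ≤ 10 members).

-- ===== PORT A =====
def MaxUnits (lst : List Int) : Int :=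
  (PySem.List.pyRange 0 ((lst.length : Int) - 2) 1).foldl (fun result i =>
    (PySem.List.pyRange (i + 1) ((lst.length : Int) - 1) 1).foldl (fun result j =>
      (PySem.List.pyRange (j + 1) (lst.length : Int) 1).foldl (fun result k =>
        let temp := PySem.Int.mod
          (PySem.List.pyGetD lst i 0 + PySem.List.pyGetD lst j 0 + PySem.List.pyGetD lst k 0) 10
        if temp > result then temp else result) result) result) 0

-- ===== PORT B =====
-- one loop iteration of Source B: update (s1, s2, s3) with element x
def MaxUnitsStep (st : PySem.Set Int × PySem.Set Int × PySem.Set Int) (x : Int) :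
    PySem.Set Int × PySem.Set Int × PySem.Set Int :=
  let r := PySem.Int.mod x 10
  (PySem.Set.add st.1 r,
   PySem.Set.union st.2.1 (PySem.Set.ofList (st.1.map (fun q => PySem.Int.mod (q + r) 10))),
   PySem.Set.union st.2.2 (PySem.Set.ofList (st.2.1.map (fun p => PySem.Int.mod (p + r) 10))))

def MaxUnits_alt (lst : List Int) : Int :=
  let st := lst.foldl MaxUnitsStep (PySem.Set.empty, PySem.Set.empty, PySem.Set.empty)
  match PySem.List.max? st.2.2 (fun v => v) with
  | some m => m
  | none => 0

-- ===== PRECONDITION & SPEC =====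
def Spec_MaxUnits (lst : List Int) (out : Int) : Prop := out = MaxUnits_alt lst
instance (lst : List Int) (out : Int) : Decidable (Spec_MaxUnits lst out) := by unfold Spec_MaxUnits; infer_instance

-- ===== CLAIM (what is proved, stated in full; the proofs are below) =====
def Claim_equal_MaxUnits : Prop := ∀ (lst : List Int), Dom_MaxUnits lst → Spec_MaxUnits lst (MaxUnits lst)

-- ===== LEMMAS AND PROOFS =====

-- v is the last digit of the sum of some three distinct-position elements of lst
def Trip (lst : List Int) (v : Int) : Prop :=
  ∃ a b c : Int, [a, b, c].Sublist lst ∧ v = PySem.Int.mod (a + b + c) 10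

-- r is max(0, max of the Trip values): characterises both programs' results
def IsAns (lst : List Int) (r : Int) : Prop :=
  (r = 0 ∨ Trip lst r) ∧ ∀ v, Trip lst v → v ≤ r

lemma trip_nonneg {lst : List Int} {v : Int} (h : Trip lst v) : 0 ≤ v := by
  obtain ⟨a, b, c, -, rfl⟩ := h
  exact PySem.Int.mod_nonneg _ (by norm_num)

lemma isAns_unique {lst : List Int} {r s : Int} (hr : IsAns lst r) (hs : IsAns lst s) : r = s := by
  obtain ⟨hr1, hr2⟩ := hr
  obtain ⟨hs1, hs2⟩ := hs
  rcases hr1 with rfl | hrT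
  · rcases hs1 with rfl | hsT
    · rfl
    · exact le_antisymm (trip_nonneg hsT) (hr2 _ hsT)
  · rcases hs1 with rfl | hsT
    · exact le_antisymm (hs2 _ hrT) (trip_nonneg hrT)
    · exact le_antisymm (hs2 _ hrT) (hr2 _ hsT)

-- ---- A side ----

lemma if_gt_eq_max (r t : Int) : (if t > r then t else r) = max r t := by
  rw [max_def]; split_ifs <;> omega

-- the flattened candidate list of A's triple loop
def CandA (lst : List Int) : List Int :=
  (PySem.List.pyRange 0 ((lst.length : Int) - 2) 1).flatMap (fun i =>
    (PySem.List.pyRange (i + 1) ((lst.length : Int) - 1) 1).flatMap (fun j =>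
      (PySem.List.pyRange (j + 1) (lst.length : Int) 1).map (fun k =>
        PySem.Int.mod
          (PySem.List.pyGetD lst i 0 + PySem.List.pyGetD lst j 0 + PySem.List.pyGetD lst k 0) 10)))

lemma maxUnits_eq_foldl_max (lst : List Int) : MaxUnits lst = (CandA lst).foldl max 0 := by
  unfold MaxUnits CandA
  rw [List.foldl_flatMap]
  simp only [List.foldl_flatMap, List.foldl_map, if_gt_eq_max]

lemma sublist_triple_of_indices (lst : List Int) (i j k : Nat)
    (hij : i < j) (hjk : j < k) (hk : k < lst.length) :
    [lst.getD i 0, lst.getD j 0, lst.getD k 0].Sublist lst := by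
  have hi : i < lst.length := by omega
  have hj : j < lst.length := by omega
  have := @List.map_getElem_sublist Int lst [⟨i, hi⟩, ⟨j, hj⟩, ⟨k, hk⟩]
    (by simp [List.pairwise_cons]; omega)
  simpa [List.getD_eq_getElem, hi, hj, hk] using this

lemma mem_candA_iff (lst : List Int) (v : Int) : v ∈ CandA lst ↔ Trip lst v := by
  unfold CandA
  simp only [List.mem_flatMap, List.mem_map, PySem.List.mem_pyRange_one]
  constructor
  · rintro ⟨i, ⟨hi0, hi2⟩, j, ⟨hij, hj1⟩, k, ⟨hjk, hk⟩, rfl⟩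
    have h1 : i.toNat < j.toNat := by omega
    have h2 : j.toNat < k.toNat := by omega
    have h3 : k.toNat < lst.length := by omega
    have hsub := sublist_triple_of_indices lst i.toNat j.toNat k.toNat h1 h2 h3
    have ei : PySem.List.pyGetD lst i 0 = lst.getD i.toNat 0 := by
      rw [PySem.List.pyGetD_eq_getElem lst 0 hi0 (by omega), List.getD_eq_getElem _ _ (by omega)]
    have ej : PySem.List.pyGetD lst j 0 = lst.getD j.toNat 0 := by
      rw [PySem.List.pyGetD_eq_getElem lst 0 (by omega) (by omega), List.getD_eq_getElem _ _ (by omega)]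
    have ek : PySem.List.pyGetD lst k 0 = lst.getD k.toNat 0 := by
      rw [PySem.List.pyGetD_eq_getElem lst 0 (by omega) (by omega), List.getD_eq_getElem _ _ (by omega)]
    rw [ei, ej, ek]
    exact ⟨_, _, _, hsub, rfl⟩
  · rintro ⟨a, b, c, hsub, rfl⟩
    obtain ⟨is, heq, hpw⟩ := List.sublist_eq_map_getElem hsub
    match is, heq with
    | [i, j, k], heq =>
      simp only [List.map_cons, List.map_nil, List.cons.injEq] at heq
      obtain ⟨ha, hb, hc, -⟩ := heq
      have hij : i < j := by
        have := hpw; simp [List.pairwise_cons] at this; omega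
      have hjk : j < k := by
        have := hpw; simp [List.pairwise_cons] at this; omega
      have hk : k < lst.length := k.isLt
      refine ⟨(i : Int), ⟨by omega, by omega⟩, (j : Int), ⟨by omega, by omega⟩,
        (k : Int), ⟨by omega, by omega⟩, ?_⟩
      have ei : PySem.List.pyGetD lst (i : Int) 0 = a := by
        rw [PySem.List.pyGetD_eq_getElem lst 0 (by omega) (by omega)]
        simp [ha]
      have ej : PySem.List.pyGetD lst (j : Int) 0 = b := by
        rw [PySem.List.pyGetD_eq_getElem lst 0 (by omega) (by omega)]
        simp [hb]
      have ek : PySem.List.pyGetD lst (k : Int) 0 = c := by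
        rw [PySem.List.pyGetD_eq_getElem lst 0 (by omega) (by omega)]
        simp [hc]
      rw [ei, ej, ek]

lemma isAns_A (lst : List Int) : IsAns lst (MaxUnits lst) := by
  rw [maxUnits_eq_foldl_max]
  constructor
  · rcases PySem.List.foldl_max_mem (CandA lst) 0 with h | h
    · exact Or.inl h
    · exact Or.inr ((mem_candA_iff lst _).mp h)
  · intro v hv
    exact (PySem.List.le_foldl_max (CandA lst) 0).2 v ((mem_candA_iff lst v).mpr hv)

-- ---- B side ----

lemma mod_add_mod_mod (a x : Int) :
    PySem.Int.mod (PySem.Int.mod a 10 + PySem.Int.mod x 10) 10 = PySem.Int.mod (a + x) 10 := by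
  rw [PySem.Int.mod_eq_emod_of_pos (by norm_num), PySem.Int.mod_eq_emod_of_pos (by norm_num),
    PySem.Int.mod_eq_emod_of_pos (by norm_num), PySem.Int.mod_eq_emod_of_pos (by norm_num)]
  rw [← Int.add_emod]

lemma pair_sublist_concat_iff (a b x : Int) (p : List Int) :
    [a, b].Sublist (p ++ [x]) ↔ [a, b].Sublist p ∨ (a ∈ p ∧ b = x) := by
  rw [List.sublist_append_iff]
  constructor
  · rintro ⟨l1, l2, heq, h1, h2⟩
    match l1, l2, heq with
    | [], l2, heq =>
      subst heq; left
      have := h2.length_le; simp at this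
    | [a'], l2, heq =>
      simp only [List.cons_append, List.nil_append, List.cons.injEq] at heq
      obtain ⟨rfl, heq2⟩ := heq
      subst heq2
      right
      refine ⟨List.singleton_sublist.mp h1, ?_⟩
      rcases List.sublist_singleton.mp h2 with h | h <;> simp_all
    | a' :: b' :: l1, l2, heq =>
      have hl := congrArg List.length heq
      simp at hl
      have : l1 = [] ∧ l2 = [] := by
        constructor <;> [skip; skip] <;> (cases l1 <;> cases l2 <;> simp_all) 
      obtain ⟨rfl, rfl⟩ := this
      simp at heq
      obtain ⟨rfl, rfl⟩ := heq
      left; simpa using h1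
  · rintro (h | ⟨ha, rfl⟩)
    · exact ⟨[a, b], [], by simp, h, by simp⟩
    · exact ⟨[a], [b], by simp, List.singleton_sublist.mpr ha, by simp⟩

lemma triple_sublist_concat_iff (a b c x : Int) (p : List Int) :
    [a, b, c].Sublist (p ++ [x]) ↔ [a, b, c].Sublist p ∨ ([a, b].Sublist p ∧ c = x) := by
  rw [List.sublist_append_iff]
  constructor
  · rintro ⟨l1, l2, heq, h1, h2⟩
    have h2len := h2.length_le
    match l1, l2, heq with
    | [], l2, heq => subst heq; simp at h2len
    | [a'], l2, heq =>
      simp only [List.cons_append, List.nil_append, List.cons.injEq] at heq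
      obtain ⟨rfl, heq2⟩ := heq
      subst heq2; simp at h2len
    | [a', b'], l2, heq =>
      simp only [List.cons_append, List.nil_append, List.cons.injEq] at heq
      obtain ⟨rfl, rfl, heq2⟩ := heq
      subst heq2
      right
      refine ⟨h1, ?_⟩
      rcases List.sublist_singleton.mp h2 with h | h <;> simp_all
    | a' :: b' :: c' :: l1, l2, heq =>
      have hl := congrArg List.length heq
      simp at hl
      have : l1 = [] ∧ l2 = [] := by
        constructor <;> (cases l1 <;> cases l2 <;> simp_all)
      obtain ⟨rfl, rfl⟩ := this
      simp at heq
      obtain ⟨rfl, rfl, rfl⟩ := heq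
      left; simpa using h1
  · rintro (h | ⟨hab, rfl⟩)
    · exact ⟨[a, b, c], [], by simp, h, by simp⟩
    · exact ⟨[a, b], [c], by simp, hab, by simp⟩

def Inv1 (p : List Int) (s : PySem.Set Int) : Prop :=
  ∀ v, v ∈ s ↔ ∃ a, a ∈ p ∧ v = PySem.Int.mod a 10
def Inv2 (p : List Int) (s : PySem.Set Int) : Prop :=
  ∀ v, v ∈ s ↔ ∃ a b : Int, [a, b].Sublist p ∧ v = PySem.Int.mod (a + b) 10
def Inv3 (p : List Int) (s : PySem.Set Int) : Prop :=
  ∀ v, v ∈ s ↔ Trip p v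

lemma step_inv (p : List Int) (x : Int) (s1 s2 s3 : PySem.Set Int)
    (h1 : Inv1 p s1) (h2 : Inv2 p s2) (h3 : Inv3 p s3) :
    Inv1 (p ++ [x]) (MaxUnitsStep (s1, s2, s3) x).1 ∧
    Inv2 (p ++ [x]) (MaxUnitsStep (s1, s2, s3) x).2.1 ∧
    Inv3 (p ++ [x]) (MaxUnitsStep (s1, s2, s3) x).2.2 := by
  refine ⟨?_, ?_, ?_⟩
  · intro v
    simp only [MaxUnitsStep, PySem.Set.mem_add, h1 v, List.mem_append, List.mem_singleton]
    constructor
    · rintro (⟨a, ha, rfl⟩ | rfl)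
      · exact ⟨a, Or.inl ha, rfl⟩
      · exact ⟨x, Or.inr rfl, rfl⟩
    · rintro ⟨a, (ha | rfl), rfl⟩
      · exact Or.inl ⟨a, ha, rfl⟩
      · exact Or.inr rfl
  · intro v
    simp only [MaxUnitsStep, PySem.Set.mem_union, PySem.Set.mem_ofList, List.mem_map, h2 v]
    constructor
    · rintro (⟨a, b, hsub, rfl⟩ | ⟨q, hq, rfl⟩)
      · exact ⟨a, b, (pair_sublist_concat_iff a b x p).mpr (Or.inl hsub), rfl⟩
      · obtain ⟨a, ha, rfl⟩ := (h1 q).mp hq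
        exact ⟨a, x, (pair_sublist_concat_iff a x x p).mpr (Or.inr ⟨ha, rfl⟩),
          mod_add_mod_mod a x⟩
    · rintro ⟨a, b, hsub, rfl⟩
      rcases (pair_sublist_concat_iff a b x p).mp hsub with h | ⟨ha, rfl⟩
      · exact Or.inl ⟨a, b, h, rfl⟩
      · exact Or.inr ⟨PySem.Int.mod a 10, (h1 _).mpr ⟨a, ha, rfl⟩, mod_add_mod_mod a b⟩
  · intro v
    simp only [MaxUnitsStep, PySem.Set.mem_union, PySem.Set.mem_ofList, List.mem_map, h3 v]
    unfold Trip
    constructor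
    · rintro (⟨a, b, c, hsub, rfl⟩ | ⟨q, hq, rfl⟩)
      · exact ⟨a, b, c, (triple_sublist_concat_iff a b c x p).mpr (Or.inl hsub), rfl⟩
      · obtain ⟨a, b, hab, rfl⟩ := (h2 q).mp hq
        exact ⟨a, b, x, (triple_sublist_concat_iff a b x x p).mpr (Or.inr ⟨hab, rfl⟩),
          mod_add_mod_mod (a + b) x⟩
    · rintro ⟨a, b, c, hsub, rfl⟩
      rcases (triple_sublist_concat_iff a b c x p).mp hsub with h | ⟨hab, rfl⟩
      · exact Or.inl ⟨a, b, c, h, rfl⟩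
      · exact Or.inr ⟨PySem.Int.mod (a + b) 10, (h2 _).mpr ⟨a, b, hab, rfl⟩,
          mod_add_mod_mod (a + b) c⟩

lemma foldl_inv (l : List Int) : ∀ (p : List Int) (s1 s2 s3 : PySem.Set Int),
    Inv1 p s1 → Inv2 p s2 → Inv3 p s3 →
    Inv3 (p ++ l) (l.foldl MaxUnitsStep (s1, s2, s3)).2.2 := by
  induction l with
  | nil => intro p s1 s2 s3 _ _ h3; simpa using h3
  | cons x l ih =>
    intro p s1 s2 s3 h1 h2 h3
    obtain ⟨h1', h2', h3'⟩ := step_inv p x s1 s2 s3 h1 h2 h3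
    have : p ++ x :: l = (p ++ [x]) ++ l := by simp
    rw [this, List.foldl_cons]
    exact ih (p ++ [x]) _ _ _ h1' h2' h3'

lemma s3_spec (lst : List Int) :
    Inv3 lst (lst.foldl MaxUnitsStep (PySem.Set.empty, PySem.Set.empty, PySem.Set.empty)).2.2 := by
  have := foldl_inv lst [] PySem.Set.empty PySem.Set.empty PySem.Set.empty
    (by intro v; simp [PySem.Set.empty])
    (by intro v
        simp only [PySem.Set.empty, List.not_mem_nil, false_iff]
        rintro ⟨a, b, hsub, -⟩
        have := hsub.length_le; simp at this)
    (by intro v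
        simp only [PySem.Set.empty, List.not_mem_nil, false_iff]
        rintro ⟨a, b, c, hsub, -⟩
        have := hsub.length_le; simp at this)
  simpa using this

lemma isAns_B (lst : List Int) : IsAns lst (MaxUnits_alt lst) := by
  have hs3 := s3_spec lst
  show IsAns lst (match PySem.List.max?
      (lst.foldl MaxUnitsStep (PySem.Set.empty, PySem.Set.empty, PySem.Set.empty)).2.2
      (fun v => v) with | some m => m | none => 0)
  cases hm : PySem.List.max?
      (lst.foldl MaxUnitsStep (PySem.Set.empty, PySem.Set.empty, PySem.Set.empty)).2.2
      (fun v => v) with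
  | none =>
    have hnil := (PySem.List.max?_eq_none_iff _ _).mp hm
    constructor
    · exact Or.inl rfl
    · intro v hv
      have := (hs3 v).mpr hv
      rw [hnil] at this
      simp at this
  | some m =>
    constructor
    · exact Or.inr ((hs3 m).mp (PySem.List.max?_mem hm))
    · intro v hv
      exact PySem.List.max?_isMax hm v ((hs3 v).mpr hv)

-- ===== VERDICT (by name: the statement is the Claim_ definition above) =====
theorem MaxUnits_spec : Claim_equal_MaxUnits := by
  intro lst _
  exact isAns_unique (isAns_A lst) (isAns_B lst)
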